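-- pv_equiv track=rewrite | github.com/josephwxf/tut | yacclex/parser_tools.py | gen_parser_file
-- ===== SOURCE A (Python) =====
-- import itertools
--
-- def gen_parser_file( toks ):
--     toks = list(set(toks))
--     toks.sort()
--     r = []
--     for m, n in itertools.groupby( toks, lambda x:x[0]):
--         r.append('\n%token '+" ".join([i.upper() for i in list(n)]))
--     r.append("\n")
--     return r
-- ===== SOURCE B (Python) =====
-- def gen_parser_file(toks):
--     # Bucket the deduplicated tokens by first character, then emit buckets in key order.
--     buckets = {}
--     for t in set(toks):
--         buckets.setdefault(t[0], []).append(t)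
--     r = []
--     for k in sorted(buckets):
--         r.append('\n%token ' + " ".join(w.upper() for w in sorted(buckets[k])))
--     r.append("\n")
--     return r
-- ===== Notes on version B (the rewrite author's own statement) =====
-- stated objective: idiomatic
-- what changed: Replaces sort-then-itertools.groupby (one linear pass over a globally sorted list) by a dict that buckets the deduplicated tokens by first character in one unsorted pass, then emits buckets in sorted key order, sorting each bucket separately.
import Mathlib
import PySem

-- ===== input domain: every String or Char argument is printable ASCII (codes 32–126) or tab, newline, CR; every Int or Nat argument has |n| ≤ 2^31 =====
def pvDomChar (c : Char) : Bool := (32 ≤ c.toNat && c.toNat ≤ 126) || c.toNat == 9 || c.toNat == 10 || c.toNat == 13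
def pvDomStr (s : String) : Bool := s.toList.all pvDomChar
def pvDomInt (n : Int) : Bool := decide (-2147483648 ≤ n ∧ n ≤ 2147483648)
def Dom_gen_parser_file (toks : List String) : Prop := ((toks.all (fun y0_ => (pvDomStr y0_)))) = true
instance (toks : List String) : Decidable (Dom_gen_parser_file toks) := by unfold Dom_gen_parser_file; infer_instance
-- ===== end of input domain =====

-- B buckets the deduplicated tokens into a dict keyed by first character (one unsorted pass),
-- then walks the keys in sorted order sorting each bucket, instead of A's global sort + groupby.

-- t[0] for a nonempty token t (Pre_ excludes ""; the default is never reached under Pre_)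
def pyHead (s : String) : Char := s.toList.headD '?'

-- ===== PORT A =====
-- consecutive grouping of itertools.groupby(toks, lambda x: x[0])
-- (fuel = list length, so the recursion is structural and kernel-reducible)
def pvGroupsF : Nat → List String → List (List String)
  | _, [] => []
  | 0, _ :: _ => []
  | n + 1, x :: xs =>
    (x :: xs.takeWhile (fun y => pyHead y == pyHead x)) ::
      pvGroupsF n (xs.dropWhile (fun y => pyHead y == pyHead x))

def pvGroups (l : List String) : List (List String) := pvGroupsF l.length l

def gen_parser_file (toks : List String) : List String :=
  let toks' := PySem.List.sorted (PySem.Set.ofList toks) (fun x => x) false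
  let r := (pvGroups toks').foldl
      (fun r g => r ++ ["\n%token " ++ PySem.Str.join " " (g.map PySem.Str.upper)]) []
  r ++ ["\n"]

-- ===== PORT B =====
def gen_parser_file_alt (toks : List String) : List String :=
  let buckets := (PySem.Set.ofList toks).foldl
      (fun d t => d.modify (pyHead t) [] (fun b => b ++ [t]))
      (PySem.Dict.empty : PySem.Dict Char (List String))
  let r := (PySem.List.sorted buckets.keys (fun k => k) false).foldl
      (fun r k => r ++ ["\n%token " ++ PySem.Str.join " "
          ((PySem.List.sorted (buckets.getD k []) (fun w => w) false).map PySem.Str.upper)]) []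
  r ++ ["\n"]

-- ===== PRECONDITION & SPEC =====
-- Pre_ excludes lists containing the empty token "": there x[0] raises IndexError in A (and in B).
def Pre_gen_parser_file (toks : List String) : Prop := ∀ t ∈ toks, t ≠ ""
instance (toks : List String) : Decidable (Pre_gen_parser_file toks) := by unfold Pre_gen_parser_file; infer_instance
def pvWitness_gen_parser_file : List String := ["b", "ab", "ax", "b"]

def Spec_gen_parser_file (toks : List String) (out : List String) : Prop := out = gen_parser_file_alt toks
instance (toks : List String) (out : List String) : Decidable (Spec_gen_parser_file toks out) := by unfold Spec_gen_parser_file; infer_instance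

-- ===== CLAIM (what is proved, stated in full; the proofs are below) =====
def Claim_equal_gen_parser_file : Prop := ∀ (toks : List String), Dom_gen_parser_file toks → Pre_gen_parser_file toks → Spec_gen_parser_file toks (gen_parser_file toks)

-- ===== LEMMAS AND PROOFS =====

-- first characters are monotone along the lexicographic string order (for nonempty strings)
lemma pyHead_mono {s t : String} (hs : s ≠ "") (hst : s < t) : pyHead s ≤ pyHead t := by
  rw [String.lt_iff_toList_lt] at hst
  have hs' : s.toList ≠ [] := by simpa using hs
  cases hsl : s.toList with
  | nil => exact absurd hsl hs'
  | cons a as =>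
    cases htl : t.toList with
    | nil => rw [hsl, htl] at hst; exact absurd hst (List.not_lt_nil _)
    | cons b bs =>
      rw [hsl, htl] at hst
      simp only [pyHead, hsl, htl, List.headD_cons]
      rcases List.cons_lt_cons_iff.mp hst with h | ⟨h, _⟩
      · exact le_of_lt h
      · exact le_of_eq h

-- the first element left by dropWhile fails the predicate
lemma pvDropWhile_cons_not {α : Type} (p : α → Bool) {l t : List α} {a : α}
    (h : l.dropWhile p = a :: t) : p a = false := by
  have h0 := List.head_dropWhile_not p (l := l) (by rw [h]; simp)
  simpa [h] using h0

-- groupby on a strictly sorted list of nonempty strings = the filters at the distinct keys, in order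
lemma pvGroupsF_eq : ∀ (n : Nat) (L : List String), L.length ≤ n →
    L.Pairwise (· < ·) → (∀ t ∈ L, t ≠ "") →
    ∃ K : List Char,
      K.Perm (PySem.Set.ofList (L.map pyHead)) ∧ K.Pairwise (· < ·) ∧
      pvGroupsF n L = K.map (fun k => L.filter (fun t => pyHead t == k)) := by
  intro n
  induction n with
  | zero =>
    intro L hlen _ _
    have : L = [] := List.eq_nil_of_length_eq_zero (Nat.le_zero.mp hlen)
    subst this
    exact ⟨[], by simp [PySem.Set.ofList], List.Pairwise.nil, by simp [pvGroupsF]⟩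
  | succ n ihn =>
    intro L hlen hL hne
    cases L with
    | nil =>
      exact ⟨[], by simp [PySem.Set.ofList], List.Pairwise.nil, by simp [pvGroupsF]⟩
    | cons x xs =>
        have hx : ∀ y ∈ xs, x < y := fun y hy => List.rel_of_pairwise_cons hL hy
        have hxs : xs.Pairwise (· < ·) := hL.of_cons
        have hnex : x ≠ "" := hne x (by simp)
        have hles : ∀ y ∈ xs, pyHead x ≤ pyHead y := fun y hy => pyHead_mono hnex (hx y hy)
        have hd_sub : (xs.dropWhile (fun y => pyHead y == pyHead x)).Sublist xs :=
          List.dropWhile_sublist _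
        have hdgt : ∀ y ∈ xs.dropWhile (fun y => pyHead y == pyHead x), pyHead x < pyHead y := by
          intro y hy
          rcases hdd : xs.dropWhile (fun y => pyHead y == pyHead x) with _ | ⟨h, d'⟩
          · rw [hdd] at hy; simp at hy
          · rw [hdd] at hy
            have hhne := pvDropWhile_cons_not _ hdd
            have hhxs : h ∈ xs := hd_sub.mem (by rw [hdd]; simp)
            have hh : pyHead x < pyHead h :=
              lt_of_le_of_ne (hles h hhxs) (by intro e; simp [← e] at hhne)
            rcases List.mem_cons.mp hy with rfl | hy'
            · exact hh
            · have hdpw : (h :: d').Pairwise (· < ·) := hdd ▸ hxs.sublist hd_sub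
              have hhy : h < y := List.rel_of_pairwise_cons hdpw hy'
              have hhne' : h ≠ "" := hne h (List.mem_cons_of_mem x hhxs)
              exact lt_of_lt_of_le hh (pyHead_mono hhne' hhy)
        obtain ⟨K', hK'perm, hK'pw, hK'eq⟩ :=
          ihn (xs.dropWhile (fun y => pyHead y == pyHead x))
            (le_trans (List.length_dropWhile_le _ _) (by simpa using Nat.lt_succ_iff.mp (by simpa using hlen)))
            (hxs.sublist hd_sub)
            (fun t ht => hne t (List.mem_cons_of_mem x (hd_sub.mem ht)))
        have hK'mem : ∀ k' ∈ K', pyHead x < k' := by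
          intro k' hk'
          have h1 : k' ∈ (xs.dropWhile (fun y => pyHead y == pyHead x)).map pyHead := by
            simpa [PySem.Set.mem_ofList] using hK'perm.mem_iff.mp hk'
          rcases List.mem_map.mp h1 with ⟨y, hy, rfl⟩
          exact hdgt y hy
        have hKpw : (pyHead x :: K').Pairwise (· < ·) := List.pairwise_cons.mpr ⟨hK'mem, hK'pw⟩
        refine ⟨pyHead x :: K', ?_, hKpw, ?_⟩
        · refine (List.perm_ext_iff_of_nodup (hKpw.imp ne_of_lt) (PySem.Set.nodup_ofList _)).mpr ?_
          intro a
          simp only [PySem.Set.mem_ofList, List.mem_map, List.mem_cons]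
          constructor
          · rintro (rfl | ha)
            · exact ⟨x, Or.inl rfl, rfl⟩
            · have h1 : a ∈ (xs.dropWhile (fun y => pyHead y == pyHead x)).map pyHead := by
                simpa [PySem.Set.mem_ofList] using hK'perm.mem_iff.mp ha
              rcases List.mem_map.mp h1 with ⟨y, hy, rfl⟩
              exact ⟨y, Or.inr (hd_sub.mem hy), rfl⟩
          · rintro ⟨y, rfl | hy, rfl⟩
            · exact Or.inl rfl
            · have hsplit : y ∈ xs.takeWhile (fun y => pyHead y == pyHead x) ++
                  xs.dropWhile (fun y => pyHead y == pyHead x) := by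
                rw [List.takeWhile_append_dropWhile]; exact hy
              rcases List.mem_append.mp hsplit with hyt | hyd
              · exact Or.inl (by simpa using List.mem_takeWhile_imp hyt)
              · refine Or.inr (hK'perm.mem_iff.mpr ?_)
                simp only [PySem.Set.mem_ofList, List.mem_map]
                exact ⟨y, hyd, rfl⟩
        · have hft : xs.filter (fun y => pyHead y == pyHead x)
              = xs.takeWhile (fun y => pyHead y == pyHead x) := by
            conv_lhs => rw [← List.takeWhile_append_dropWhile
              (p := fun y => pyHead y == pyHead x) (l := xs)]
            rw [List.filter_append,
                List.filter_eq_self.mpr (fun y hy => by exact List.mem_takeWhile_imp (l := xs) (p := fun y => pyHead y == pyHead x) hy),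
                List.filter_eq_nil_iff.mpr
                  (fun y hy => by simpa using ne_of_gt (hdgt y hy)),
                List.append_nil]
          have hhead : (x :: xs).filter (fun t => pyHead t == pyHead x)
              = x :: xs.takeWhile (fun y => pyHead y == pyHead x) := by
            rw [List.filter_cons]
            simp only [beq_self_eq_true, if_true]
            rw [hft]
          have htail : ∀ k' : Char, pyHead x ≠ k' →
              (x :: xs).filter (fun t => pyHead t == k')
                = (xs.dropWhile (fun y => pyHead y == pyHead x)).filter (fun t => pyHead t == k') := by
            intro k' hkne
            rw [List.filter_cons, if_neg (by simpa using hkne)]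
            conv_lhs => rw [← List.takeWhile_append_dropWhile
              (p := fun y => pyHead y == pyHead x) (l := xs)]
            rw [List.filter_append,
                List.filter_eq_nil_iff.mpr (fun y hy => by
                  have h2 := List.mem_takeWhile_imp hy
                  simp only [beq_iff_eq] at h2 ⊢
                  rw [h2]; exact hkne),
                List.nil_append]
          simp only [pvGroupsF]
          rw [hK'eq, List.map_cons, hhead]
          congr 1
          apply List.map_congr_left
          intro k' hk'
          exact (htail k' (ne_of_lt (hK'mem k' hk'))).symm

lemma pvGroups_eq (L : List String) (hL : L.Pairwise (· < ·)) (hne : ∀ t ∈ L, t ≠ "") :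
    ∃ K : List Char,
      K.Perm (PySem.Set.ofList (L.map pyHead)) ∧ K.Pairwise (· < ·) ∧
      pvGroups L = K.map (fun k => L.filter (fun t => pyHead t == k)) :=
  pvGroupsF_eq L.length L (le_refl _) hL hne

-- ===== VERDICT (by name: the statement is the Claim_ definition above) =====
theorem gen_parser_file_spec : Claim_equal_gen_parser_file := by
  intro toks _ hpre
  unfold Spec_gen_parser_file gen_parser_file gen_parser_file_alt
  have hLperm : (PySem.List.sorted (PySem.Set.ofList toks) (fun x => x) false).Perm
      (PySem.Set.ofList toks) := PySem.List.sorted_perm _ _ _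
  set S := PySem.Set.ofList toks with hS
  set L := PySem.List.sorted S (fun x => x) false with hLdef
  have hL : L.Pairwise (· < ·) := PySem.List.sorted_ofList_pairwise_lt toks
  have hneL : ∀ t ∈ L, t ≠ "" := by
    intro t ht
    refine hpre t ?_
    have h1 : t ∈ S := hLperm.mem_iff.mp ht
    rw [hS] at h1
    exact (PySem.Set.mem_ofList toks t).mp h1
  obtain ⟨K, hKperm, hKpw, hgroups⟩ := pvGroups_eq L hL hneL
  set bkt := S.foldl (fun d t => d.modify (pyHead t) [] (fun b => b ++ [t]))
      (PySem.Dict.empty : PySem.Dict Char (List String)) with hb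
  have hkeys : bkt.keys = PySem.Set.ofList (S.map pyHead) := by
    rw [hb, PySem.Dict.keys_foldl_modify_key]
    simp [PySem.Dict.keys_empty]
    rfl
  have hbucket : ∀ k, bkt.getD k [] = S.filter (fun t => pyHead t == k) := by
    intro k
    have hfold : S.foldl (fun d t => d.modify (pyHead t) [] (fun b => b ++ [t]))
          (PySem.Dict.empty : PySem.Dict Char (List String))
        = (S.map (fun t => (pyHead t, t))).foldl
            (fun d pr => d.modify pr.1 [] (fun b => b ++ [pr.2]))
            (PySem.Dict.empty : PySem.Dict Char (List String)) := by
      rw [List.foldl_map]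
    rw [hb, hfold, PySem.Dict.getD_foldl_modify_append, PySem.Dict.getD_empty,
        List.nil_append, List.filter_map]
    simp [Function.comp_def]
  have hKS : PySem.List.sorted bkt.keys (fun k => k) false = K := by
    rw [hkeys]
    refine PySem.List.sorted_eq_of_perm_of_pairwise_lt _ _ _ ?_ hKpw
    refine hKperm.trans ?_
    refine (List.perm_ext_iff_of_nodup (PySem.Set.nodup_ofList _) (PySem.Set.nodup_ofList _)).mpr ?_
    intro a
    simp only [PySem.Set.mem_ofList, List.mem_map]
    constructor <;> rintro ⟨y, hy, rfl⟩
    · exact ⟨y, hLperm.mem_iff.mp hy, rfl⟩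
    · exact ⟨y, hLperm.mem_iff.mpr hy, rfl⟩
  have hsb : ∀ k : Char, PySem.List.sorted (S.filter (fun t => pyHead t == k)) (fun w => w) false
      = L.filter (fun t => pyHead t == k) :=
    fun k => PySem.List.sorted_eq_of_perm_of_pairwise_lt _ _ _
      (hLperm.filter _) (List.Pairwise.filter _ hL)
  simp only [PySem.List.foldl_append_singleton_eq_map, List.nil_append]
  rw [hgroups, hKS, List.map_map]
  congr 1
  apply List.map_congr_left
  intro k hk
  simp only [Function.comp]
  rw [hbucket, hsb]
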